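-- pv_equiv track=rewrite | github.com/wcfcarolina13/Web3_Ecosystem_Processor | lib/import_engine.py | map_ecosystem_to_chain
-- ===== SOURCE A (Python) =====
-- from typing import Dict, List, Optional, Tuple
--
-- def map_ecosystem_to_chain(
--     ecosystem: str, chains_config: List[Dict]
-- ) -> Optional[str]:
--     """
--     Map an ecosystem name to a chain ID from chains.json.
--
--     Tries: exact ID match, case-insensitive name match, containment.
--     Returns chain ID or None.
--     """
--     eco_lower = ecosystem.lower().strip()
--     if not eco_lower:
--         return None
--
--     for chain in chains_config:
--         chain_id = chain["id"].lower()
--         chain_name = chain["name"].lower()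
--
--         # Exact ID match
--         if eco_lower == chain_id:
--             return chain["id"]
--         # Exact name match
--         if eco_lower == chain_name:
--             return chain["id"]
--
--     # Containment: ecosystem contains chain name or vice versa
--     for chain in chains_config:
--         chain_name = chain["name"].lower()
--         if eco_lower in chain_name or chain_name in eco_lower:
--             return chain["id"]
--
--     return None
-- ===== SOURCE B (Python) =====
-- from typing import Dict, List, Optional
--
--
-- def map_ecosystem_to_chain(
--     ecosystem: str, chains_config: List[Dict]
-- ) -> Optional[str]:
--     """One exhaustive pass folding two accumulators: the first exact match
--     and the first containment match are each remembered (no early return);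
--     afterwards the exact candidate wins, else the containment candidate."""
--     eco = ecosystem.lower().strip()
--     if not eco:
--         return None
--
--     exact = None
--     contain = None
--     for chain in chains_config:
--         cid = chain["id"].lower()
--         name = chain["name"].lower()
--         if exact is None and (eco == cid or eco == name):
--             exact = chain["id"]
--         if contain is None and (eco in name or name in eco):
--             contain = chain["id"]
--     return exact if exact is not None else contain
-- ===== Notes on version B (the rewrite author's own statement) =====
-- stated objective: alternative
-- what changed: A's two early-returning scans are replaced by a single exhaustive fold over chains_config that accumulates the first exact match and the first containment match in two variables and selects between them after the loop.
-- outside the precondition, e.g. on map_ecosystem_to_chain('x', [{'id': 'x', 'name': 'x'}, {}]): A returns 'x', B raises KeyError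
import Mathlib
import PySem

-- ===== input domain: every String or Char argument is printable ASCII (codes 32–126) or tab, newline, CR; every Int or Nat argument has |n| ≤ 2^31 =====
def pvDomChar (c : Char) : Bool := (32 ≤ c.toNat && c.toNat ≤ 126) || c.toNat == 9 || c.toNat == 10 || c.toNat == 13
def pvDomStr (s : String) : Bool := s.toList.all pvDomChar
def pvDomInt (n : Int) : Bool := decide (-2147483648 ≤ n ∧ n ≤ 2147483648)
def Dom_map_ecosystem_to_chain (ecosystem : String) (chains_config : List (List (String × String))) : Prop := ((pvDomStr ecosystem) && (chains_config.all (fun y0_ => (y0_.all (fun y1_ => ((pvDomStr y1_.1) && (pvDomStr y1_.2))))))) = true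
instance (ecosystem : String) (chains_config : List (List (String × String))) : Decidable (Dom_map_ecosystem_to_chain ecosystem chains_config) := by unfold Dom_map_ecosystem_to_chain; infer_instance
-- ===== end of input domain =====

-- B replaces A's two early-returning scans by one exhaustive fold carrying two
-- accumulators (first exact match, first containment match), selected after the
-- loop (objective: alternative, same cost).

-- ===== PORT A =====
-- chain["k"]: first-match lookup; inside Pre_ the key is always present
def pvChainGet (chain : List (String × String)) (k : String) : String :=
  ((PySem.Dict.mk chain).get? k).getD ""

-- first loop of A: exact id / exact name match, early return
def pvALoop1 (eco : String) : List (List (String × String)) → Option String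
  | [] => none
  | c :: cs =>
    let chain_id := PySem.Str.lower (pvChainGet c "id")
    let chain_name := PySem.Str.lower (pvChainGet c "name")
    if eco == chain_id then some (pvChainGet c "id")
    else if eco == chain_name then some (pvChainGet c "id")
    else pvALoop1 eco cs

-- second loop of A: containment, early return
def pvALoop2 (eco : String) : List (List (String × String)) → Option String
  | [] => none
  | c :: cs =>
    let chain_name := PySem.Str.lower (pvChainGet c "name")
    if PySem.Str.isIn eco chain_name || PySem.Str.isIn chain_name eco then
      some (pvChainGet c "id")
    else pvALoop2 eco cs

def map_ecosystem_to_chain (ecosystem : String) (chains_config : List (List (String × String))) : Option String :=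
  let eco_lower := PySem.Str.strip (PySem.Str.lower ecosystem)
  if eco_lower == "" then none
  else
    match pvALoop1 eco_lower chains_config with
    | some r => some r
    | none => pvALoop2 eco_lower chains_config

-- ===== PORT B =====
-- one step of B's loop body over the accumulator pair (exact, contain)
def pvBStep (eco : String) (acc : Option String × Option String)
    (chain : List (String × String)) : Option String × Option String :=
  let cid := PySem.Str.lower (((PySem.Dict.mk chain).get? "id").getD "")
  let name := PySem.Str.lower (((PySem.Dict.mk chain).get? "name").getD "")
  let exact := if acc.1.isNone && (eco == cid || eco == name)
               then some (((PySem.Dict.mk chain).get? "id").getD "") else acc.1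
  let contain := if acc.2.isNone && (PySem.Str.isIn eco name || PySem.Str.isIn name eco)
                 then some (((PySem.Dict.mk chain).get? "id").getD "") else acc.2
  (exact, contain)

def map_ecosystem_to_chain_alt (ecosystem : String) (chains_config : List (List (String × String))) : Option String :=
  let eco := PySem.Str.strip (PySem.Str.lower ecosystem)
  if eco == "" then none
  else
    let acc := chains_config.foldl (pvBStep eco) (none, none)
    match acc.1 with
    | some r => some r
    | none => acc.2

-- ===== PRECONDITION & SPEC =====
-- Pre_ excludes configs in which some chain dict lacks the key "id" or "name" while the stripped
-- ecosystem is nonempty: there Python A may raise KeyError (and on a few such inputs A still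
-- returns, when its early-exit scan stops before the malformed chain, while B's exhaustive
-- pass raises).
def Pre_map_ecosystem_to_chain (ecosystem : String) (chains_config : List (List (String × String))) : Prop :=
  PySem.Str.strip (PySem.Str.lower ecosystem) = "" ∨
  (chains_config.all (fun c => (PySem.Dict.mk c).contains "id" && (PySem.Dict.mk c).contains "name")) = true
instance (ecosystem : String) (chains_config : List (List (String × String))) : Decidable (Pre_map_ecosystem_to_chain ecosystem chains_config) := by unfold Pre_map_ecosystem_to_chain; infer_instance

def pvWitness_map_ecosystem_to_chain : String × (List (List (String × String))) :=
  ("eth", [[("id", "ETH"), ("name", "Ethereum")]])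

def Spec_map_ecosystem_to_chain (ecosystem : String) (chains_config : List (List (String × String))) (out : Option String) : Prop := out = map_ecosystem_to_chain_alt ecosystem chains_config
instance (ecosystem : String) (chains_config : List (List (String × String))) (out : Option String) : Decidable (Spec_map_ecosystem_to_chain ecosystem chains_config out) := by unfold Spec_map_ecosystem_to_chain; infer_instance

-- ===== CLAIM =====
def Claim_equal_map_ecosystem_to_chain : Prop := ∀ (ecosystem : String) (chains_config : List (List (String × String))), Dom_map_ecosystem_to_chain ecosystem chains_config → Pre_map_ecosystem_to_chain ecosystem chains_config → Spec_map_ecosystem_to_chain ecosystem chains_config (map_ecosystem_to_chain ecosystem chains_config)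

-- ===== LEMMAS AND PROOFS =====

-- B's fold, started from (ex, co), yields each accumulator's first fill:
-- ex kept if already set, else A's first-pass result; likewise co with A's second pass.
lemma pvFold_eq (eco : String) (cc : List (List (String × String)))
    (ex co : Option String) :
    cc.foldl (pvBStep eco) (ex, co) =
      (ex.or (pvALoop1 eco cc), co.or (pvALoop2 eco cc)) := by
  induction cc generalizing ex co with
  | nil => simp [pvALoop1, pvALoop2]
  | cons c cs ih =>
    simp only [List.foldl_cons, ih, pvBStep, pvALoop1, pvALoop2, pvChainGet]
    cases ex <;> cases co <;>
      simp only [Option.or, Option.isNone_some, Option.isNone_none, Bool.false_and,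
        Bool.true_and, if_false, Bool.false_eq_true] <;>
      split_ifs <;> simp_all [Option.or]

-- ===== VERDICT =====
theorem map_ecosystem_to_chain_spec : Claim_equal_map_ecosystem_to_chain := by
  intro eco cc _ _
  unfold Spec_map_ecosystem_to_chain map_ecosystem_to_chain map_ecosystem_to_chain_alt
  by_cases h : (PySem.Str.strip (PySem.Str.lower eco) == "") = true
  · simp [h]
  · simp only [h, if_false, Bool.false_eq_true, pvFold_eq]
    cases pvALoop1 (PySem.Str.strip (PySem.Str.lower eco)) cc <;> rfl
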